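-- pv_equiv track=rewrite | github.com/noralroub/Video_Generator_Final | web/views.py | _get_completed_steps_from_progress
-- ===== SOURCE A (Python) =====
-- def _get_completed_steps_from_progress(progress_percent: int) -> list:
--     """Convert progress percent to list of completed step names."""
--     steps = [
--         ("fetch-paper", 25),
--         ("generate-script", 50),
--         ("generate-audio", 75),
--         ("generate-videos", 100),
--     ]
--
--     completed_steps = []
--     for step_name, step_percent in steps:
--         if progress_percent >= step_percent:
--             completed_steps.append(step_name)
--
--     return completed_steps
-- ===== SOURCE B (Python) =====
-- def _get_completed_steps_from_progress(progress_percent: int) -> list: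
--     """Convert progress percent to list of completed step names."""
--     names = ["fetch-paper", "generate-script", "generate-audio", "generate-videos"]
--     count = min(4, max(0, progress_percent // 25))
--     return names[:count]
-- ===== Notes on version B (the rewrite author's own statement) =====
-- stated objective: simpler
-- what changed: Replaces the per-threshold loop of >= comparisons with a closed-form count = min(4, max(0, progress // 25)) and a single prefix slice of the step names.
import Mathlib
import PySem

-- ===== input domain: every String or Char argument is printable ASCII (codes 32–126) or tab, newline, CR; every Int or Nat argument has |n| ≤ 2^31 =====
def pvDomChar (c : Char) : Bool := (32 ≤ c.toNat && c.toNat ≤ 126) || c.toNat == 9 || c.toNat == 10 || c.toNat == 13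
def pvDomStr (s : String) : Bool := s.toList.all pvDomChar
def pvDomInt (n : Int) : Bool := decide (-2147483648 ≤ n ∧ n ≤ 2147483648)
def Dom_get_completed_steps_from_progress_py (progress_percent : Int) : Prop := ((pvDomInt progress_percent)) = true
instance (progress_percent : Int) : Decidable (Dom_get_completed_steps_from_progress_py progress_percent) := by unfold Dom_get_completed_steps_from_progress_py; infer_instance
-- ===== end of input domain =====

-- ===== PORT A =====
-- B computes the completed prefix in closed form (count = min(4, max(0, p // 25)) then slice) instead of A's per-threshold comparison loop; objective: simpler.
def get_completed_steps_from_progress_py (progress_percent : Int) : List String :=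
  let steps : List (String × Int) :=
    [("fetch-paper", 25), ("generate-script", 50), ("generate-audio", 75), ("generate-videos", 100)]
  steps.foldl (fun completed_steps sp =>
    if progress_percent ≥ sp.2 then completed_steps ++ [sp.1] else completed_steps) []

-- ===== PORT B =====
def get_completed_steps_from_progress_py_alt (progress_percent : Int) : List String :=
  let names : List String := ["fetch-paper", "generate-script", "generate-audio", "generate-videos"]
  let count : Int := min 4 (max 0 (PySem.Int.floordiv progress_percent 25))
  names.take count.toNat

-- ===== PRECONDITION & SPEC =====
def Spec_get_completed_steps_from_progress_py (progress_percent : Int) (out : List String) : Prop := out = get_completed_steps_from_progress_py_alt progress_percent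
instance (progress_percent : Int) (out : List String) : Decidable (Spec_get_completed_steps_from_progress_py progress_percent out) := by unfold Spec_get_completed_steps_from_progress_py; infer_instance

-- ===== CLAIM (what is proved, stated in full; the proofs are below) =====
def Claim_equal_get_completed_steps_from_progress_py : Prop := ∀ (progress_percent : Int), Dom_get_completed_steps_from_progress_py progress_percent → Spec_get_completed_steps_from_progress_py progress_percent (get_completed_steps_from_progress_py progress_percent)

-- ===== LEMMAS AND PROOFS =====

-- ===== VERDICT (by name: the statement is the Claim_ definition above) =====
theorem get_completed_steps_from_progress_py_spec : Claim_equal_get_completed_steps_from_progress_py := by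
  intro p _
  show _ = _
  simp only [get_completed_steps_from_progress_py, get_completed_steps_from_progress_py_alt,
    List.foldl, PySem.Int.floordiv]
  have h := Int.mul_ediv_add_emod p 25
  have h1 := Int.emod_nonneg p (by norm_num : (25:Int) ≠ 0)
  have h2 := Int.emod_lt_of_pos p (by norm_num : (0:Int) < 25)
  have hf : Int.fdiv p 25 = p / 25 := by rw [Int.fdiv_eq_ediv]; simp
  rw [hf]
  rcases lt_or_ge p 25 with hc | hc
  · have : min 4 (max 0 (p / 25)) = 0 := by omega
    simp [this, if_neg (by omega : ¬ p ≥ 25), if_neg (by omega : ¬ p ≥ 50),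
      if_neg (by omega : ¬ p ≥ 75), if_neg (by omega : ¬ p ≥ 100)]
  rcases lt_or_ge p 50 with hc2 | hc2
  · have : min 4 (max 0 (p / 25)) = 1 := by omega
    simp [this, if_pos (by omega : p ≥ 25), if_neg (by omega : ¬ p ≥ 50),
      if_neg (by omega : ¬ p ≥ 75), if_neg (by omega : ¬ p ≥ 100)]
  rcases lt_or_ge p 75 with hc3 | hc3
  · have : min 4 (max 0 (p / 25)) = 2 := by omega
    simp [this, if_pos (by omega : p ≥ 25), if_pos (by omega : p ≥ 50),
      if_neg (by omega : ¬ p ≥ 75), if_neg (by omega : ¬ p ≥ 100)]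
  rcases lt_or_ge p 100 with hc4 | hc4
  · have : min 4 (max 0 (p / 25)) = 3 := by omega
    simp [this, if_pos (by omega : p ≥ 25), if_pos (by omega : p ≥ 50),
      if_pos (by omega : p ≥ 75), if_neg (by omega : ¬ p ≥ 100)]
  · have : min 4 (max 0 (p / 25)) = 4 := by omega
    simp [this, if_pos (by omega : p ≥ 25), if_pos (by omega : p ≥ 50),
      if_pos (by omega : p ≥ 75), if_pos (by omega : p ≥ 100)]
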